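-- pv_equiv track=rewrite | github.com/Jij-Inc/Qamomile | qamomile/core/converters/qrao/graph_coloring.py | check_linear_term
-- ===== SOURCE A (Python) =====
-- def check_linear_term(
--     color_group: dict[int, list[int]],
--     linear_term_index: list[int],
--     max_color_group_size: int,
-- ) -> dict[int, list[int]]:
--     """Search for items within the index of linear term that have not been assigned to the color_group, and add them.
--
--     Args:
--         color_group (dict[int, list[int]]): color_group
--         linear_term_index (list[int]): list of index of linear term
--         max_color_group_size (int): the maximum number of encoding qubits. if you want to use for the qrac31, set 3.
--
--     Returns:
--         dict[int, list[int]]: color_group which added items within the index of linear term that have not been assigned to the color_group.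
--     """
--     idx_in_color_group = []
--     for v in color_group.values():
--         idx_in_color_group.extend(v)
--
--     # We're adding a bit to the next index of the 'quad' qubit, affecting only the linear term.
--     # If the Ising Hamiltonian has only linear terms, making 'quad' empty and causing a 'max' error, we return index 0 to avoid this.
--     qubit_index_for_linear = max(color_group.keys()) + 1 if color_group else 0
--     bits_in_qubits_counter = 1
--     for idx in linear_term_index:
--         if idx not in idx_in_color_group:
--             if bits_in_qubits_counter == 1:
--                 color_group[qubit_index_for_linear] = []
--
--             color_group[qubit_index_for_linear].append(idx)
--             bits_in_qubits_counter += 1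
--
--             if bits_in_qubits_counter > max_color_group_size:
--                 qubit_index_for_linear += 1
--                 bits_in_qubits_counter = 1
--
--     return color_group
-- ===== SOURCE B (Python) =====
-- def check_linear_term(
--     color_group: dict[int, list[int]],
--     linear_term_index: list[int],
--     max_color_group_size: int,
-- ) -> dict[int, list[int]]:
--     """Add unassigned linear-term indices into color_group in chunks (in place)."""
--     assigned = set()
--     for v in color_group.values():
--         assigned.update(v)
--     unassigned = [i for i in linear_term_index if i not in assigned]
--     size = max(max_color_group_size, 1)
--     key = (max(color_group) + 1) if color_group else 0
--     while unassigned: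
--         color_group[key] = unassigned[:size]
--         unassigned = unassigned[size:]
--         key += 1
--     return color_group
-- ===== Notes on version B (the rewrite author's own statement) =====
-- stated objective: faster
-- what changed: B replaces A's per-element linear scan of the already-assigned list and its stateful counter/key machine by: build a set of assigned indices once, filter the unassigned indices in one pass, and slice them into fixed-size chunks assigned to consecutive fresh keys.
import Mathlib
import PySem

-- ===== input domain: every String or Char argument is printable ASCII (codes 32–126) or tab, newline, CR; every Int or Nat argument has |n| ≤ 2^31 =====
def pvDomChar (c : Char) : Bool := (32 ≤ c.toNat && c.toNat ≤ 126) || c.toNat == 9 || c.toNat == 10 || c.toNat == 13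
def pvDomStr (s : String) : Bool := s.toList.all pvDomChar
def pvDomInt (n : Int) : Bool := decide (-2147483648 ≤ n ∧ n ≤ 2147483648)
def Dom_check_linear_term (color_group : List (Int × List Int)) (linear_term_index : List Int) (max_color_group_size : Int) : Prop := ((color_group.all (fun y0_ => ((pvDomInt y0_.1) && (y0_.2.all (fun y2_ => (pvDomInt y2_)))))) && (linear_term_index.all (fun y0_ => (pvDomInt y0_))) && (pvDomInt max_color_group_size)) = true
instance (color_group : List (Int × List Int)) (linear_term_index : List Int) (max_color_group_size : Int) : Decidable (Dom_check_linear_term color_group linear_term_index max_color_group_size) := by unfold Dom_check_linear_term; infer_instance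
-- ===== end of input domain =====

-- B replaces A's per-element scan of the assigned list and its counter/key machine by a set of
-- assigned indices, one filtering pass, and fixed-size slicing into consecutive fresh keys (faster).
-- Both versions mutate the Python dict in place; the equivalence proved is about the returned dict.

-- ===== PORT A =====
def check_linear_term (color_group : List (Int × List Int)) (linear_term_index : List Int) (max_color_group_size : Int) : List (Int × List Int) :=
  let d0 : PySem.Dict Int (List Int) := PySem.Dict.ofList color_group
  -- idx_in_color_group = []; for v in color_group.values(): idx_in_color_group.extend(v)
  let idx_in_color_group : List Int := d0.values.foldl (fun acc v => acc ++ v) []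
  -- qubit_index_for_linear = max(color_group.keys()) + 1 if color_group else 0
  -- (max? is none exactly when the dict is empty, so the match is Python's guarded max)
  let q0 : Int :=
    match PySem.List.max? d0.keys (fun k => k) with
    | some m => m + 1
    | none => 0
  let final := linear_term_index.foldl
    (fun (st : PySem.Dict Int (List Int) × Int × Int) idx =>
      if idx_in_color_group.contains idx then st
      else
        let d := if st.2.2 = 1 then st.1.insert st.2.1 [] else st.1
        -- color_group[q].append(idx): the key is always present here, so dflt [] is never used
        let d := d.modify st.2.1 [] (fun v => v ++ [idx])
        let c := st.2.2 + 1
        if c > max_color_group_size then (d, st.2.1 + 1, 1) else (d, st.2.1, c))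
    (d0, q0, 1)
  final.1.items

-- ===== PORT B =====
-- while unassigned: color_group[key] = unassigned[:size]; unassigned = unassigned[size:]; key += 1
-- (fuel = initial length of unassigned; size ≥ 1 so the list strictly shrinks and fuel suffices;
--  unassigned[:size]/[size:] with size ≥ 1 are take/drop)
def pvAltGo (size : Nat) : Nat → PySem.Dict Int (List Int) → Int → List Int → PySem.Dict Int (List Int)
  | _, d, _, [] => d
  | 0, d, _, _ :: _ => d
  | fuel + 1, d, key, x :: xs =>
      pvAltGo size fuel (d.insert key ((x :: xs).take size)) (key + 1) ((x :: xs).drop size)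

def check_linear_term_alt (color_group : List (Int × List Int)) (linear_term_index : List Int) (max_color_group_size : Int) : List (Int × List Int) :=
  let d0 : PySem.Dict Int (List Int) := PySem.Dict.ofList color_group
  -- assigned = set(); for v in color_group.values(): assigned.update(v)
  let assigned : PySem.Set Int := d0.values.foldl (fun s v => PySem.Set.update s v) PySem.Set.empty
  let unassigned : List Int := linear_term_index.filter (fun i => !(PySem.Set.contains assigned i))
  let size : Int := max max_color_group_size 1
  -- key = (max(color_group) + 1) if color_group else 0
  let key : Int :=
    match PySem.List.max? d0.keys (fun k => k) with
    | some m => m + 1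
    | none => 0
  (pvAltGo size.toNat unassigned.length d0 key unassigned).items

-- ===== PRECONDITION & SPEC =====
def Spec_check_linear_term (color_group : List (Int × List Int)) (linear_term_index : List Int) (max_color_group_size : Int) (out : List (Int × List Int)) : Prop := out = check_linear_term_alt color_group linear_term_index max_color_group_size
instance (color_group : List (Int × List Int)) (linear_term_index : List Int) (max_color_group_size : Int) (out : List (Int × List Int)) : Decidable (Spec_check_linear_term color_group linear_term_index max_color_group_size out) := by unfold Spec_check_linear_term; infer_instance

-- ===== CLAIM (what is proved, stated in full; the proofs are below) =====
def Claim_equal_check_linear_term : Prop := ∀ (color_group : List (Int × List Int)) (linear_term_index : List Int) (max_color_group_size : Int), Dom_check_linear_term color_group linear_term_index max_color_group_size → Spec_check_linear_term color_group linear_term_index max_color_group_size (check_linear_term color_group linear_term_index max_color_group_size)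

-- ===== LEMMAS AND PROOFS =====


-- Abbreviations for the shared sub-expressions of the two ports (proof-only helpers)
def pvD0 (cg : List (Int × List Int)) : PySem.Dict Int (List Int) := PySem.Dict.ofList cg
def pvFlat (cg : List (Int × List Int)) : List Int := (pvD0 cg).values.foldl (fun acc v => acc ++ v) []
def pvQ0 (cg : List (Int × List Int)) : Int :=
  match PySem.List.max? (pvD0 cg).keys (fun k => k) with
  | some m => m + 1
  | none => 0
def pvAssigned (cg : List (Int × List Int)) : PySem.Set Int :=
  (pvD0 cg).values.foldl (fun s v => PySem.Set.update s v) PySem.Set.empty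
def pvUn (cg : List (Int × List Int)) (lti : List Int) : List Int :=
  lti.filter (fun i => !(PySem.Set.contains (pvAssigned cg) i))

-- A's loop body without the membership guard
def pvStep (s : Int) (st : PySem.Dict Int (List Int) × Int × Int) (idx : Int) : PySem.Dict Int (List Int) × Int × Int :=
  let d := if st.2.2 = 1 then st.1.insert st.2.1 [] else st.1
  let d := d.modify st.2.1 [] (fun v => v ++ [idx])
  let c := st.2.2 + 1
  if c > s then (d, st.2.1 + 1, 1) else (d, st.2.1, c)

-- the canonical "chunks of size s starting at key q" list (fuel-guarded)
def pvChunks (s : Nat) : Nat → Int → List Int → List (Int × List Int)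
  | _, _, [] => []
  | 0, _, _ :: _ => []
  | fuel + 1, q, x :: xs => (q, (x :: xs).take s) :: pvChunks s fuel (q + 1) ((x :: xs).drop s)

theorem pvFreshNotContains (d : PySem.Dict Int (List Int)) (q : Int)
    (h : ∀ kv ∈ d.items, kv.1 < q) : d.contains q = false := by
  simp only [PySem.Dict.contains, List.any_eq_false]
  intro kv hkv
  simp only [beq_iff_eq]
  exact ne_of_lt (h kv hkv)

theorem pvInsertFresh (d : PySem.Dict Int (List Int)) (q : Int) (v : List Int)
    (h : ∀ kv ∈ d.items, kv.1 < q) :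
    d.insert q v = PySem.Dict.mk (d.items ++ [(q, v)]) := by
  apply PySem.Dict.ext
  rw [PySem.Dict.items_insert_of_not_contains d v (pvFreshNotContains d q h)]

theorem pvModifyLast (l : List (Int × List Int)) (q : Int) (p : List Int) (f : List Int → List Int)
    (h : ∀ kv ∈ l, kv.1 < q) :
    (PySem.Dict.mk (l ++ [(q, p)])).modify q [] f = PySem.Dict.mk (l ++ [(q, f p)]) := by
  have hfind : l.find? (fun kv => kv.1 == q) = none := by
    rw [List.find?_eq_none]
    intro kv hkv
    simp only [beq_iff_eq]
    exact ne_of_lt (h kv hkv)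
  have hget : (PySem.Dict.mk (l ++ [(q, p)])).getD q [] = p := by
    simp [PySem.Dict.getD, PySem.Dict.get?, List.find?_append, hfind]
  have hcont : (PySem.Dict.mk (l ++ [(q, p)])).contains q = true := by
    simp [PySem.Dict.contains]
  apply PySem.Dict.ext
  simp only [PySem.Dict.modify, hget, PySem.Dict.insert, hcont, if_true]
  simp only [List.map_append, List.map_cons, List.map_nil, beq_self_eq_true, if_pos]
  congr 1
  rw [List.map_congr_left (g := id), List.map_id]
  intro kv hkv
  simp [ne_of_lt (h kv hkv)]

theorem pvChunksCongr (s : Nat) (hs : 1 ≤ s) :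
    ∀ (f₁ : Nat), ∀ (f₂ : Nat) (q : Int) (un : List Int), un.length ≤ f₁ → un.length ≤ f₂ →
      pvChunks s f₁ q un = pvChunks s f₂ q un := by
  intro f₁
  induction f₁ with
  | zero =>
    intro f₂ q un h1 _
    have : un = [] := List.eq_nil_of_length_eq_zero (Nat.le_zero.mp h1)
    subst this
    cases f₂ <;> rfl
  | succ f ih =>
    intro f₂ q un h1 h2
    cases un with
    | nil => cases f₂ <;> rfl
    | cons x xs =>
      cases f₂ with
      | zero => simp at h2
      | succ f₂' =>
        simp only [pvChunks]
        congr 1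
        apply ih
        · simp only [List.length_drop, List.length_cons] at *; omega
        · simp only [List.length_drop, List.length_cons] at *; omega

theorem pvAltGoItems (s : Nat) :
    ∀ (fuel : Nat) (un : List Int) (d : PySem.Dict Int (List Int)) (q : Int),
      (∀ kv ∈ d.items, kv.1 < q) →
      (pvAltGo s fuel d q un).items = d.items ++ pvChunks s fuel q un := by
  intro fuel
  induction fuel with
  | zero =>
    intro un d q _
    cases un <;> simp [pvAltGo, pvChunks]
  | succ f ih =>
    intro un d q h
    cases un with
    | nil => simp [pvAltGo, pvChunks]
    | cons x xs =>
      simp only [pvAltGo, pvChunks]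
      rw [pvInsertFresh d q _ h]
      rw [ih]
      · simp
      · intro kv hkv
        rcases List.mem_append.mp hkv with h1 | h1
        · have := h kv h1; omega
        · simp only [List.mem_singleton] at h1
          rw [h1]; simp

theorem pvFoldlGuard (flat : List Int) (s : Int) :
    ∀ (L : List Int) (st : PySem.Dict Int (List Int) × Int × Int),
      L.foldl (fun st idx => if flat.contains idx then st else pvStep s st idx) st
        = (L.filter (fun i => !(flat.contains i))).foldl (pvStep s) st := by
  intro L
  induction L with
  | nil => intro st; rfl
  | cons x xs ih =>
    intro st
    rw [List.foldl_cons, List.filter_cons]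
    by_cases hx : flat.contains x = true
    · have hb : (!flat.contains x) = false := by rw [hx]; rfl
      rw [if_pos hx, hb, if_neg (by simp)]
      exact ih st
    · have hx' : flat.contains x = false := eq_false_of_ne_true hx
      have hb : (!flat.contains x) = true := by rw [hx']; rfl
      rw [if_neg hx, hb, if_pos rfl, List.foldl_cons]
      exact ih (pvStep s st x)

theorem pvFreshSnoc (d : PySem.Dict Int (List Int)) (q : Int) (v : List Int)
    (h : ∀ kv ∈ d.items, kv.1 < q) :
    ∀ kv ∈ (PySem.Dict.mk (d.items ++ [(q, v)])).items, kv.1 < q + 1 := by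
  intro kv hkv
  rcases List.mem_append.mp hkv with h1 | h1
  · have := h kv h1; omega
  · simp only [List.mem_singleton] at h1; rw [h1]; simp

theorem pvStepOne (s : Int) (d : PySem.Dict Int (List Int)) (q x : Int)
    (h : ∀ kv ∈ d.items, kv.1 < q) :
    pvStep s (d, q, 1) x
      = (PySem.Dict.mk (d.items ++ [(q, [x])]), if (2:Int) > s then (q + 1, 1) else (q, 2)) := by
  unfold pvStep
  dsimp only
  rw [if_pos rfl, pvInsertFresh d q [] h, pvModifyLast d.items q [] _ h]
  norm_num
  split_ifs <;> rfl

theorem pvStepMany (s : Int) (d : PySem.Dict Int (List Int)) (q x : Int) (p : List Int)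
    (hp : p ≠ []) (h : ∀ kv ∈ d.items, kv.1 < q) :
    pvStep s (PySem.Dict.mk (d.items ++ [(q, p)]), q, (p.length : Int) + 1) x
      = (PySem.Dict.mk (d.items ++ [(q, p ++ [x])]),
         if (p.length : Int) + 2 > s then (q + 1, 1) else (q, (p.length : Int) + 2)) := by
  unfold pvStep
  dsimp only
  have hne : ¬ ((p.length : Int) + 1 = 1) := by
    have : p.length ≠ 0 := by simpa using hp
    omega
  rw [if_neg hne, pvModifyLast d.items q p _ h]
  ring_nf
  split_ifs <;> rfl

theorem pvA (s : Int) :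
    ∀ (n : Nat) (un : List Int), un.length ≤ n → ∀ (d : PySem.Dict Int (List Int)) (q : Int),
      (∀ kv ∈ d.items, kv.1 < q) →
      ((un.foldl (pvStep s) (d, q, 1)).1.items
          = d.items ++ pvChunks (max s 1).toNat un.length q un)
      ∧ (∀ p : List Int, p ≠ [] → (p.length : Int) < s →
          ((un.foldl (pvStep s) (PySem.Dict.mk (d.items ++ [(q, p)]), q, (p.length : Int) + 1)).1.items
            = d.items ++ (q, p ++ un.take ((max s 1).toNat - p.length))
                :: pvChunks (max s 1).toNat un.length (q + 1) (un.drop ((max s 1).toNat - p.length)))) := by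
  intro n
  induction n with
  | zero =>
    intro un hlen d q hF
    have hu : un = [] := List.eq_nil_of_length_eq_zero (Nat.le_zero.mp hlen)
    subst hu
    exact ⟨by simp [pvChunks], fun p hp hps => by simp [pvChunks]⟩
  | succ n ih =>
    intro un hlen d q hF
    cases un with
    | nil =>
      exact ⟨by simp [pvChunks], fun p hp hps => by simp [pvChunks]⟩
    | cons x xs =>
      have hxs : xs.length ≤ n := by simp at hlen; omega
      have hs1 : 1 ≤ (max s 1).toNat := by omega
      constructor
      · -- counter = 1 : open a fresh group with [x]
        rw [List.foldl_cons, pvStepOne s d q x hF]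
        by_cases hov : (2:Int) > s
        · rw [if_pos hov]
          have hF' := pvFreshSnoc d q [x] hF
          rw [(ih xs hxs (PySem.Dict.mk (d.items ++ [(q, [x])])) (q + 1) hF').1]
          have hsN : (max s 1).toNat = 1 := by omega
          rw [hsN]
          rw [show pvChunks 1 (x :: xs).length q (x :: xs)
                = (q, [x]) :: pvChunks 1 xs.length (q + 1) xs from by simp [pvChunks]]
          simp
        · rw [if_neg hov]
          have h2s : (2:Int) ≤ s := by omega
          have htail := (ih xs hxs d q hF).2 [x] (by simp) (by simp; omega)
          simp only [List.length_cons, List.length_nil, Nat.cast_one, Nat.zero_add] at htail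
          norm_num at htail
          rw [htail]
          obtain ⟨k, hk⟩ : ∃ k, (max s 1).toNat = k + 1 := ⟨(max s 1).toNat - 1, by omega⟩
          rw [show pvChunks (max s 1).toNat (x :: xs).length q (x :: xs)
                = (q, (x :: xs).take (max s 1).toNat)
                    :: pvChunks (max s 1).toNat xs.length (q + 1) ((x :: xs).drop (max s 1).toNat) from by
              simp [pvChunks]]
          rw [hk, List.take_succ_cons, List.drop_succ_cons]
          have : k = (max s 1).toNat - 1 := by omega
          rw [this]
          simp
      · -- counter > 1 : the group at q already holds p
        intro p hp hps
        rw [List.foldl_cons, pvStepMany s d q x p hp hF]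
        by_cases hov : (p.length : Int) + 2 > s
        · rw [if_pos hov]
          have hF' := pvFreshSnoc d q (p ++ [x]) hF
          rw [(ih xs hxs (PySem.Dict.mk (d.items ++ [(q, p ++ [x])])) (q + 1) hF').1]
          have hsN : (max s 1).toNat = p.length + 1 := by omega
          rw [hsN]
          have h1 : p.length + 1 - p.length = 1 := by omega
          rw [h1, List.take_succ_cons, List.drop_succ_cons, List.take_zero, List.drop_zero]
          rw [pvChunksCongr (p.length + 1) (by omega) (x :: xs).length xs.length (q + 1) xs
              (by simp) le_rfl]
          simp
        · rw [if_neg hov]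
          have hlen2 : (p.length : Int) + 2 ≤ s := by omega
          have htail := (ih xs hxs d q hF).2 (p ++ [x]) (by simp) (by simp; omega)
          have hcast : ((p ++ [x]).length : Int) + 1 = (p.length : Int) + 2 := by
            simp; omega
          rw [List.length_append, List.length_cons, List.length_nil] at htail
          rw [show ((p.length + (0 + 1) : Nat) : Int) + 1 = (p.length : Int) + 2 from by push_cast; ring]
            at htail
          have hsN : (max s 1).toNat = s.toNat := by omega
          have hge : p.length + 2 ≤ s.toNat := by omega
          obtain ⟨k, hk⟩ : ∃ k, (max s 1).toNat - p.length = k + 1 := ⟨(max s 1).toNat - p.length - 1, by omega⟩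
          have hk2 : k = (max s 1).toNat - (p.length + (0 + 1)) := by omega
          rw [hk, List.take_succ_cons, List.drop_succ_cons, htail, ← hk2]
          rw [pvChunksCongr (max s 1).toNat hs1 (x :: xs).length xs.length (q + 1)
              (List.drop k xs) (by simp [List.length_drop]; omega)
              (by simp [List.length_drop])]
          simp

theorem pvFreshQ0 (cg : List (Int × List Int)) : ∀ kv ∈ (pvD0 cg).items, kv.1 < pvQ0 cg := by
  intro kv hkv
  unfold pvQ0
  cases hmax : PySem.List.max? (pvD0 cg).keys (fun k => k) with
  | none =>
    have : (pvD0 cg).keys = [] := (PySem.List.max?_eq_none_iff _ _).mp hmax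
    have : (pvD0 cg).items = [] := by
      simpa [PySem.Dict.keys] using this
    rw [this] at hkv
    simp at hkv
  | some m =>
    have hmem : kv.1 ∈ (pvD0 cg).keys := by
      simp only [PySem.Dict.keys, List.mem_map]
      exact ⟨kv, hkv, rfl⟩
    have := PySem.List.max?_isMax hmax kv.1 hmem
    simp only at this ⊢
    omega

theorem pvFlatMemFold :
    ∀ (vs : List (List Int)) (acc : List Int) (i : Int),
      i ∈ vs.foldl (fun a v => a ++ v) acc ↔ i ∈ acc ∨ ∃ v ∈ vs, i ∈ v := by
  intro vs
  induction vs with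
  | nil => simp
  | cons v vs ih =>
    intro acc i
    rw [List.foldl_cons, ih]
    simp [List.mem_append, or_assoc]

theorem pvSetMemUpdate (v : List Int) :
    ∀ (s : PySem.Set Int) (i : Int), i ∈ PySem.Set.update s v ↔ i ∈ s ∨ i ∈ v := by
  induction v with
  | nil => intro s i; simp [PySem.Set.update]
  | cons x xs ih =>
    intro s i
    simp only [PySem.Set.update, List.foldl_cons] at ih ⊢
    rw [ih, PySem.Set.mem_add]
    simp
    tauto

theorem pvSetMemFold :
    ∀ (vs : List (List Int)) (s : PySem.Set Int) (i : Int),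
      i ∈ vs.foldl (fun s v => PySem.Set.update s v) s ↔ i ∈ s ∨ ∃ v ∈ vs, i ∈ v := by
  intro vs
  induction vs with
  | nil => simp
  | cons v vs ih =>
    intro s i
    rw [List.foldl_cons, ih, pvSetMemUpdate]
    simp [or_assoc]

theorem pvContainsEq (cg : List (Int × List Int)) (i : Int) :
    (pvFlat cg).contains i = PySem.Set.contains (pvAssigned cg) i := by
  have h1 : (pvFlat cg).contains i = true ↔ i ∈ pvFlat cg := List.contains_iff_mem
  have h2 : PySem.Set.contains (pvAssigned cg) i = true ↔ i ∈ pvAssigned cg := by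
    simp only [PySem.Set.contains]
    exact List.contains_iff_mem
  have h3 : (i ∈ pvFlat cg) ↔ (i ∈ pvAssigned cg) := by
    unfold pvFlat pvAssigned
    rw [pvFlatMemFold, pvSetMemFold]
    simp [PySem.Set.empty]
  cases ha : (pvFlat cg).contains i <;> cases hb : PySem.Set.contains (pvAssigned cg) i <;>
    simp_all

theorem pvUnEq (cg : List (Int × List Int)) (lti : List Int) :
    lti.filter (fun i => !((pvFlat cg).contains i)) = pvUn cg lti := by
  unfold pvUn
  apply List.filter_congr
  intro i _
  rw [pvContainsEq]

theorem pvMainEq (cg : List (Int × List Int)) (lti : List Int) (m : Int) :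
    check_linear_term cg lti m = check_linear_term_alt cg lti m := by
  have hA : check_linear_term cg lti m
      = ((lti.foldl (fun st idx => if (pvFlat cg).contains idx then st else pvStep m st idx)
          (pvD0 cg, pvQ0 cg, 1)).1).items := rfl
  have hB : check_linear_term_alt cg lti m
      = (pvAltGo (max m 1).toNat (pvUn cg lti).length (pvD0 cg) (pvQ0 cg) (pvUn cg lti)).items := rfl
  rw [hA, hB, pvFoldlGuard (pvFlat cg) m lti, pvUnEq]
  rw [(pvA m (pvUn cg lti).length (pvUn cg lti) le_rfl (pvD0 cg) (pvQ0 cg) (pvFreshQ0 cg)).1]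
  rw [pvAltGoItems (max m 1).toNat (pvUn cg lti).length (pvUn cg lti) (pvD0 cg) (pvQ0 cg)
      (pvFreshQ0 cg)]

-- ===== VERDICT (by name: the statement is the Claim_ definition above) =====
theorem check_linear_term_spec : Claim_equal_check_linear_term := by
  intro cg lti m _
  unfold Spec_check_linear_term
  exact pvMainEq cg lti m
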